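-- pv_equiv track=rewrite | github.com/sksmslhy/Java_Lexical_and_Syntax_Analyzer | main.py | isSingleCharacter
-- ===== SOURCE A (Python) =====
-- LETTER = ['a', 'b', 'c', 'd', 'e', 'f', 'g', 'h', 'i', 'j', 'k', 'l', 'm', 'n', 'o', 'p', 'q', 'r', 's', 't', 'u', 'v', 'w', 'x', 'y', 'z',
--             'A', 'B', 'C', 'D', 'E', 'F', 'G', 'H', 'I', 'J', 'K', 'L', 'M', 'N', 'O', 'P', 'Q', 'R', 'S', 'T', 'U', 'V', 'W', 'X', 'Y', 'Z']
--
-- ZERO = ['0']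
--
-- NON_ZERO = ['1','2','3','4','5','6','7','8','9']
--
-- QUOTE = ["'"]
--
-- WHITE_SPACE = [' ', '\t', '\n']
--
-- def isSingleCharacter(token) :
--     state = ['T0', 'T1', 'T2', 'T3', 'T4', 'T5', 'T6']
--     locate = state[0]
--     for value in token:
--         if locate == state[0]:
--             if value in QUOTE:
--                 locate = state[1]
--             else : return False
--         elif locate == state[1]:
--             if value in ZERO:
--                 locate = state[2]
--             elif value in NON_ZERO:
--                 locate = state[3]
--             elif value in LETTER:
--                 locate = state[4]
--             elif value in WHITE_SPACE:
--                 locate = state[5]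
--             else : return False
--         elif locate == state[2]:
--             if value in QUOTE:
--                 locate = state[6]
--             else : return False
--         elif locate == state[3]:
--             if value in QUOTE:
--                 locate = state[6]
--             else : return False
--         elif locate == state[4]:
--             if value in QUOTE:
--                 locate = state[6]
--             else : return False
--         elif locate == state[5]:
--             if value in QUOTE:
--                 locate = state[6]
--             else : return False
--         else: return False
--
--     if locate == state[6]:
--         return True
--     else:
--         return False
-- ===== SOURCE B (Python) =====
-- def isSingleCharacter(token):
--     # closed form: exactly  '<allowed char>'  where the allowed char is an
--     # ASCII letter, a digit, or one of space/tab/newline (given by ranges).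
--     if len(token) != 3 or token[0] != "'" or token[2] != "'":
--         return False
--     c = token[1]
--     return ('a' <= c <= 'z') or ('A' <= c <= 'Z') or ('0' <= c <= '9') or c in " \t\n"
-- ===== Notes on version B (the rewrite author's own statement) =====
-- stated objective: simpler
-- what changed: Replaced the 7-state DFA loop over the token with a closed-form check: length 3, quotes at both ends, and the middle character classified by ASCII range comparisons instead of list membership.
import Mathlib
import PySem

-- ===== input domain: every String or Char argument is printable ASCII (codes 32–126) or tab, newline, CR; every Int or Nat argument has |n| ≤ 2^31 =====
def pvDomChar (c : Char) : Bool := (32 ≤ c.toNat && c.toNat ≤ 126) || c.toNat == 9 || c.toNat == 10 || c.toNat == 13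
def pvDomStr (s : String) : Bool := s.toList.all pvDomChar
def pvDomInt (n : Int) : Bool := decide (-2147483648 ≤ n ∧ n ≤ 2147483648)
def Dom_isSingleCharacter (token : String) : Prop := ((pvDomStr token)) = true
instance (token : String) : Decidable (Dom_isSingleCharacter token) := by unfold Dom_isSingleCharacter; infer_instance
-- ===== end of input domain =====

-- B replaces A's 7-state DFA loop by a closed-form check on a length-3 string,
-- classifying the middle character by ASCII range comparisons (objective: simpler).
-- ===== PORT A =====
def pyLETTER : List Char := ['a', 'b', 'c', 'd', 'e', 'f', 'g', 'h', 'i', 'j', 'k', 'l', 'm', 'n', 'o', 'p', 'q', 'r', 's', 't', 'u', 'v', 'w', 'x', 'y', 'z',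
  'A', 'B', 'C', 'D', 'E', 'F', 'G', 'H', 'I', 'J', 'K', 'L', 'M', 'N', 'O', 'P', 'Q', 'R', 'S', 'T', 'U', 'V', 'W', 'X', 'Y', 'Z']
def pyZERO : List Char := ['0']
def pyNON_ZERO : List Char := ['1','2','3','4','5','6','7','8','9']
def pyQUOTE : List Char := ['\'']
def pyWHITE_SPACE : List Char := [' ', '\t', '\n']

-- the for-loop of A, with `locate` as the state index 0..6; `false` is the early `return False`
def pyDfaLoop : List Char → Nat → Bool
  | [], locate => locate == 6
  | value :: rest, locate =>
    if locate == 0 then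
      if pyQUOTE.contains value then pyDfaLoop rest 1 else false
    else if locate == 1 then
      if pyZERO.contains value then pyDfaLoop rest 2
      else if pyNON_ZERO.contains value then pyDfaLoop rest 3
      else if pyLETTER.contains value then pyDfaLoop rest 4
      else if pyWHITE_SPACE.contains value then pyDfaLoop rest 5
      else false
    else if locate == 2 then
      if pyQUOTE.contains value then pyDfaLoop rest 6 else false
    else if locate == 3 then
      if pyQUOTE.contains value then pyDfaLoop rest 6 else false
    else if locate == 4 then
      if pyQUOTE.contains value then pyDfaLoop rest 6 else false
    else if locate == 5 then
      if pyQUOTE.contains value then pyDfaLoop rest 6 else false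
    else false

def isSingleCharacter (token : String) : Bool := pyDfaLoop token.toList 0

-- ===== PORT B =====
-- `'a' <= c <= 'z'` etc. port to Char order comparisons; `c in " \t\n"` to the three equalities.
def pvAllowedMid (c : Char) : Bool :=
  ('a' ≤ c && c ≤ 'z') || ('A' ≤ c && c ≤ 'Z') || ('0' ≤ c && c ≤ '9')
    || c == ' ' || c == '\t' || c == '\n'

def isSingleCharacter_alt (token : String) : Bool :=
  match token.toList with
  | [a, b, c] => if a == '\'' && c == '\'' then pvAllowedMid b else false
  | _ => false

-- ===== PRECONDITION & SPEC =====
def Spec_isSingleCharacter (token : String) (out : Bool) : Prop := out = isSingleCharacter_alt token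
instance (token : String) (out : Bool) : Decidable (Spec_isSingleCharacter token out) := by unfold Spec_isSingleCharacter; infer_instance

-- ===== CLAIM (what is proved, stated in full; the proofs are below) =====
def Claim_equal_isSingleCharacter : Prop := ∀ (token : String), Dom_isSingleCharacter token → Spec_isSingleCharacter token (isSingleCharacter token)

-- ===== LEMMAS AND PROOFS =====
theorem mid_eq (b : Char) :
    (pyZERO.contains b || pyNON_ZERO.contains b || pyLETTER.contains b || pyWHITE_SPACE.contains b)
      = pvAllowedMid b := by
  simp only [pyZERO, pyNON_ZERO, pyLETTER, pyWHITE_SPACE, pvAllowedMid,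
    List.contains_cons, List.contains_nil, Bool.or_false]
  rw [Bool.eq_iff_iff]
  simp [Char.le_def, Char.ext_iff, UInt32.le_iff_toNat_le, UInt32.ext_iff]
  omega

theorem stepA0 (a : Char) (rest : List Char) :
    pyDfaLoop (a :: rest) 0 = if a == '\'' then pyDfaLoop rest 1 else false := by
  simp [pyDfaLoop, pyQUOTE]

theorem stepA1 (b : Char) (rest : List Char) :
    pyDfaLoop (b :: rest) 1 =
      (if pyZERO.contains b then pyDfaLoop rest 2
       else if pyNON_ZERO.contains b then pyDfaLoop rest 3
       else if pyLETTER.contains b then pyDfaLoop rest 4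
       else if pyWHITE_SPACE.contains b then pyDfaLoop rest 5
       else false) := by
  simp [pyDfaLoop]

theorem stepMid (k : Nat) (hk : k = 2 ∨ k = 3 ∨ k = 4 ∨ k = 5) (c : Char) (rest : List Char) :
    pyDfaLoop (c :: rest) k = if c == '\'' then pyDfaLoop rest 6 else false := by
  rcases hk with h | h | h | h <;> subst h <;> simp [pyDfaLoop, pyQUOTE]

theorem step6 (d : Char) (rest : List Char) : pyDfaLoop (d :: rest) 6 = false := by
  simp [pyDfaLoop]

theorem dfaLoop_eq (l : List Char) :
    pyDfaLoop l 0 =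
      (match l with
       | [a, b, c] => if a == '\'' && c == '\'' then pvAllowedMid b else false
       | _ => false) := by
  match l with
  | [] => rfl
  | [a] =>
    rw [stepA0]; split_ifs <;> simp [pyDfaLoop]
  | [a, b] =>
    rw [stepA0]; split_ifs with ha
    · rw [stepA1]; split_ifs <;> rfl
    · rfl
  | [a, b, c] =>
    show pyDfaLoop [a, b, c] 0 = if a == '\'' && c == '\'' then pvAllowedMid b else false
    rw [stepA0, ← mid_eq]
    by_cases ha : (a == '\'') = true
    · rw [if_pos ha, stepA1]
      split_ifs with h2 h3 h4 h5 <;>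
        first
          | (rw [stepMid _ (by omega)]
             split_ifs with hc <;> simp_all [pyDfaLoop])
          | simp_all
    · rw [if_neg ha, if_neg (by simp_all)]
  | a :: b :: c :: d :: rest =>
    rw [stepA0]; split_ifs with ha
    · rw [stepA1]
      split_ifs <;>
        first
          | (rw [stepMid _ (by omega)]
             split_ifs with hc
             · exact step6 d rest
             · rfl)
          | rfl
    · rfl

-- ===== VERDICT (by name: the statement is the Claim_ definition above) =====
theorem isSingleCharacter_spec : Claim_equal_isSingleCharacter := by
  intro token _
  unfold Spec_isSingleCharacter isSingleCharacter isSingleCharacter_alt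
  exact dfaLoop_eq token.toList
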